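-- pv_equiv track=rewrite | github.com/jonddeck/Sorting-Algorithms | Overview/all_sorts_visualizer.py | track_quick
-- ===== SOURCE A (Python) =====
-- def track_quick(arr):
--     a = list(arr)
--     steps = [a.copy()]
--     highlights = [[]]
--
--     def partition(lo, hi):
--         p = a[hi]
--         i = lo - 1
--         for j in range(lo, hi):
--             if a[j] <= p:
--                 i += 1
--                 a[i], a[j] = a[j], a[i]
--                 steps.append(a.copy())
--                 highlights.append([i, j])
--         a[i + 1], a[hi] = a[hi], a[i + 1]
--         steps.append(a.copy())
--         highlights.append([i + 1, hi])
--         return i + 1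
--
--     def sort(lo, hi):
--         if lo < hi:
--             pi = partition(lo, hi)
--             sort(lo, pi - 1)
--             sort(pi + 1, hi)
--
--     sort(0, len(a) - 1)
--     return steps, highlights
-- ===== SOURCE B (Python) =====
-- def track_quick(arr):
--     a = list(arr)
--     steps = [a.copy()]
--     highlights = [[]]
--
--     def partition(lo, hi):
--         p = a[hi]
--         i = lo - 1
--         for j in range(lo, hi):
--             if a[j] <= p:
--                 i += 1
--                 a[i], a[j] = a[j], a[i]
--                 steps.append(a.copy())
--                 highlights.append([i, j])
--         a[i + 1], a[hi] = a[hi], a[i + 1]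
--         steps.append(a.copy())
--         highlights.append([i + 1, hi])
--         return i + 1
--
--     # explicit stack instead of recursion; push right range then left,
--     # so the left subrange is processed first (same preorder as the recursion)
--     stack = [(0, len(a) - 1)]
--     while stack:
--         lo, hi = stack.pop()
--         if lo < hi:
--             pi = partition(lo, hi)
--             stack.append((pi + 1, hi))
--             stack.append((lo, pi - 1))
--     return steps, highlights
-- ===== Notes on version B (the rewrite author's own statement) =====
-- stated objective: alternative
-- what changed: The recursive sort driver is replaced by an iterative explicit-stack loop (push right subrange then left) producing the identical snapshot/highlight trace without recursion.
import Mathlib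
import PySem

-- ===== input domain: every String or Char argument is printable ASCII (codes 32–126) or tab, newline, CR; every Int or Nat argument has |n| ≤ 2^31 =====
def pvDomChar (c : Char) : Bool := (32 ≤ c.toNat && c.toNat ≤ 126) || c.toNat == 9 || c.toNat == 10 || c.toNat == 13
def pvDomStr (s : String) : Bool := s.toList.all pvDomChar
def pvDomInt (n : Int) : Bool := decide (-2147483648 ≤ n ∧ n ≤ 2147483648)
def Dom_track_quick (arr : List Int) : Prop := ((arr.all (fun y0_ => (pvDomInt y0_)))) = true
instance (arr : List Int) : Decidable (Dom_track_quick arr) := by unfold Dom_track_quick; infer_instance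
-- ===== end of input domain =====

-- B rewrites the recursive quicksort driver as an explicit-stack loop (push right subrange
-- then left); the partition routine and the recorded trace are identical.

-- ===== PORT A =====
-- shared state (a, steps, highlights); both Python versions carry it as closed-over mutable variables
abbrev QState := List Int × List (List Int) × List (List Int)

-- a[i], a[j] = a[j], a[i]; all call sites use indices that are nonnegative and in range
def qSwap (a : List Int) (i j : Int) : List Int :=
  PySem.List.pySetD (PySem.List.pySetD a i (PySem.List.pyGetD a j 0)) j (PySem.List.pyGetD a i 0)

-- body of the 'for j in range(lo, hi)' loop of partition; accumulator is (state, i)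
def partStep (p : Int) (st : QState × Int) (j : Int) : QState × Int :=
  let ((a, steps, highs), i) := st
  if PySem.List.pyGetD a j 0 ≤ p then
    let i' := i + 1
    let a' := qSwap a i' j
    ((a', steps ++ [a'], highs ++ [[i', j]]), i')
  else st

-- the nested 'partition(lo, hi)' (textually identical in A and in B); returns (new state, i + 1)
def qPartition (st : QState) (lo hi : Int) : QState × Int :=
  let p := PySem.List.pyGetD st.1 hi 0
  let r := (PySem.List.pyRange lo hi 1).foldl (partStep p) (st, lo - 1)
  let a' := qSwap r.1.1 (r.2 + 1) hi
  ((a', r.1.2.1 ++ [a'], r.1.2.2 ++ [[r.2 + 1, hi]]), r.2 + 1)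

-- the recursive 'sort(lo, hi)' of A; the fuel argument is only a totality guard
-- (recursion depth is at most hi - lo, and track_quick supplies more than that)
def sortA : Nat → QState → Int → Int → QState
  | 0, st, _, _ => st
  | f + 1, st, lo, hi =>
    if lo < hi then
      sortA f (sortA f (qPartition st lo hi).1 lo ((qPartition st lo hi).2 - 1))
        ((qPartition st lo hi).2 + 1) hi
    else st

def track_quick (arr : List Int) : List (List Int) × List (List Int) :=
  let st := sortA (arr.length + 1) (arr, [arr], [[]]) 0 ((arr.length : Int) - 1)
  (st.2.1, st.2.2)

-- ===== PORT B =====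
-- the 'while stack:' loop of B: pop (lo, hi); if lo < hi, partition and push right range then
-- left (so the left one is popped first); fuel is only a totality guard (each iteration
-- strictly decreases Σ (2·(hi+1−lo)⁺ + 1) over the stack, which starts at 2·len+1)
def loopB : Nat → List (Int × Int) → QState → QState
  | 0, _, st => st
  | _ + 1, [], st => st
  | f + 1, (lo, hi) :: rest, st =>
    if lo < hi then
      loopB f ((lo, (qPartition st lo hi).2 - 1) :: ((qPartition st lo hi).2 + 1, hi) :: rest)
        (qPartition st lo hi).1
    else loopB f rest st

def track_quick_alt (arr : List Int) : List (List Int) × List (List Int) :=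
  let st := loopB (2 * arr.length + 2) [(0, (arr.length : Int) - 1)] (arr, [arr], [[]])
  (st.2.1, st.2.2)

-- ===== PRECONDITION & SPEC =====
def Spec_track_quick (arr : List Int) (out : List (List Int) × List (List Int)) : Prop := out = track_quick_alt arr
instance (arr : List Int) (out : List (List Int) × List (List Int)) : Decidable (Spec_track_quick arr out) := by unfold Spec_track_quick; infer_instance

-- ===== CLAIM (what is proved, stated in full; the proofs are below) =====
def Claim_equal_track_quick : Prop := ∀ (arr : List Int), Dom_track_quick arr → Spec_track_quick arr (track_quick arr)

-- ===== LEMMAS AND PROOFS =====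

-- i only grows, by at most one per iteration of partition's for-loop
theorem partStep_i_bounds (p : Int) (l : List Int) (st : QState × Int) :
    st.2 ≤ (l.foldl (partStep p) st).2 ∧ (l.foldl (partStep p) st).2 ≤ st.2 + l.length := by
  induction l generalizing st with
  | nil => simp
  | cons x xs ih =>
    have h := ih (partStep p st x)
    have hx : st.2 ≤ (partStep p st x).2 ∧ (partStep p st x).2 ≤ st.2 + 1 := by
      obtain ⟨⟨a, steps, highs⟩, i⟩ := st
      simp only [partStep]
      split <;> simp
    simp only [List.foldl_cons, List.length_cons]
    omega

-- the pivot index lies in [lo, hi]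
theorem qPartition_bounds (st : QState) (lo hi : Int) (h : lo < hi) :
    lo ≤ (qPartition st lo hi).2 ∧ (qPartition st lo hi).2 ≤ hi := by
  have hb := partStep_i_bounds (PySem.List.pyGetD st.1 hi 0) (PySem.List.pyRange lo hi 1) (st, lo - 1)
  have hlen : (PySem.List.pyRange lo hi 1).length = (hi - lo).toNat := PySem.List.length_pyRange_one lo hi
  simp only [qPartition]
  omega

-- sortA does not depend on the fuel once the fuel exceeds hi - lo
theorem sortA_fuel (f : Nat) :
    ∀ (g : Nat) (lo hi : Int) (st : QState), (hi - lo).toNat < f → (hi - lo).toNat < g →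
      sortA f st lo hi = sortA g st lo hi := by
  induction f with
  | zero => intro g lo hi st hf _; exact absurd hf (Nat.not_lt_zero _)
  | succ f ih =>
    intro g lo hi st hf hg
    cases g with
    | zero => exact absurd hg (Nat.not_lt_zero _)
    | succ g =>
      by_cases hlt : lo < hi
      · have hb := qPartition_bounds st lo hi hlt
        simp only [sortA, if_pos hlt]
        rw [ih g lo ((qPartition st lo hi).2 - 1) _ (by omega) (by omega),
            ih g ((qPartition st lo hi).2 + 1) hi _ (by omega) (by omega)]
      · simp only [sortA, if_neg hlt]

-- sortA with its canonical sufficient fuel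
def sortI (st : QState) (lo hi : Int) : QState := sortA ((hi - lo).toNat + 1) st lo hi

def stackMeasure (stack : List (Int × Int)) : Nat :=
  (stack.map (fun q => 2 * (q.2 + 1 - q.1).toNat + 1)).sum

theorem stackMeasure_nil : stackMeasure [] = 0 := rfl

theorem stackMeasure_cons (lo hi : Int) (rest : List (Int × Int)) :
    stackMeasure ((lo, hi) :: rest) = 2 * (hi + 1 - lo).toNat + 1 + stackMeasure rest := by
  simp [stackMeasure]

theorem loopB_nil (f : Nat) (st : QState) : loopB f [] st = st := by
  cases f <;> rfl

-- loopB does not depend on the fuel once the fuel reaches the stack measure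
theorem loopB_fuel (f : Nat) :
    ∀ (g : Nat) (stack : List (Int × Int)) (st : QState),
      stackMeasure stack ≤ f → stackMeasure stack ≤ g → loopB f stack st = loopB g stack st := by
  induction f with
  | zero =>
    intro g stack st hf _
    cases stack with
    | nil => rw [loopB_nil, loopB_nil]
    | cons q rest => rw [stackMeasure_cons q.1 q.2 rest] at hf; omega
  | succ f ih =>
    intro g stack st hf hg
    cases stack with
    | nil => rw [loopB_nil, loopB_nil]
    | cons q rest =>
      obtain ⟨lo, hi⟩ := q
      cases g with
      | zero => rw [stackMeasure_cons] at hg; omega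
      | succ g =>
        rw [stackMeasure_cons] at hf hg
        by_cases hlt : lo < hi
        · have hb := qPartition_bounds st lo hi hlt
          simp only [loopB, if_pos hlt]
          exact ih g _ _ (by rw [stackMeasure_cons, stackMeasure_cons]; omega)
            (by rw [stackMeasure_cons, stackMeasure_cons]; omega)
        · simp only [loopB, if_neg hlt]
          exact ih g rest st (by omega) (by omega)

-- one unfolding of sortI when lo < hi
theorem sortI_step (st : QState) (lo hi : Int) (hlt : lo < hi) :
    sortI st lo hi =
      sortI (sortI (qPartition st lo hi).1 lo ((qPartition st lo hi).2 - 1))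
        ((qPartition st lo hi).2 + 1) hi := by
  have hb := qPartition_bounds st lo hi hlt
  simp only [sortI]
  conv_lhs => simp only [sortA]
  rw [if_pos hlt,
      sortA_fuel (hi - lo).toNat (((qPartition st lo hi).2 - 1 - lo).toNat + 1) lo
        ((qPartition st lo hi).2 - 1) _ (by omega) (by omega),
      sortA_fuel (hi - lo).toNat ((hi - ((qPartition st lo hi).2 + 1)).toNat + 1)
        ((qPartition st lo hi).2 + 1) hi _ (by omega) (by omega)]

theorem sortI_stop (st : QState) (lo hi : Int) (hlt : ¬ lo < hi) : sortI st lo hi = st := by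
  simp only [sortI, sortA, if_neg hlt]

-- popping (lo, hi) and continuing the loop equals recursively sorting [lo, hi] first
theorem loopB_eq_sortI (f : Nat) :
    ∀ (lo hi : Int) (rest : List (Int × Int)) (st : QState),
      stackMeasure ((lo, hi) :: rest) ≤ f →
      loopB f ((lo, hi) :: rest) st = loopB f rest (sortI st lo hi) := by
  induction f with
  | zero => intro lo hi rest st hf; rw [stackMeasure_cons] at hf; omega
  | succ f ih =>
    intro lo hi rest st hf
    rw [stackMeasure_cons] at hf
    by_cases hlt : lo < hi
    · have hb := qPartition_bounds st lo hi hlt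
      simp only [loopB, if_pos hlt]
      rw [ih lo ((qPartition st lo hi).2 - 1) _ _
            (by rw [stackMeasure_cons, stackMeasure_cons]; omega),
          ih ((qPartition st lo hi).2 + 1) hi _ _ (by rw [stackMeasure_cons]; omega),
          loopB_fuel f (f + 1) rest _ (by omega) (by omega),
          sortI_step st lo hi hlt]
    · simp only [loopB, if_neg hlt]
      rw [sortI_stop st lo hi hlt, loopB_fuel f (f + 1) rest st (by omega) (by omega)]

-- ===== VERDICT (by name: the statement is the Claim_ definition above) =====
theorem track_quick_spec : Claim_equal_track_quick := by
  intro arr _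
  unfold Spec_track_quick track_quick track_quick_alt
  rw [loopB_eq_sortI (2 * arr.length + 2) 0 ((arr.length : Int) - 1) [] (arr, [arr], [[]])
        (by rw [stackMeasure_cons, stackMeasure_nil]; omega),
      loopB_nil]
  unfold sortI
  rw [sortA_fuel (arr.length + 1) (((arr.length : Int) - 1 - 0).toNat + 1) 0
        ((arr.length : Int) - 1) (arr, [arr], [[]]) (by omega) (by omega)]
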